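-- pv_equiv track=rewrite | github.com/TaeHyoungKwon/Codewars | 2020/code_wars/python/8kyu/201208_a_wolf_in_sheep_clothing.py | warn_the_sheep
-- ===== SOURCE A (Python) =====
-- SHEEP = 'sheep'
--
-- WOLF = 'wolf'
--
-- NOT_CLOSEST_WOLF_MSG = "Oi! Sheep number {}! You are about to be eaten by a wolf!"
--
-- CLOSEST_WOLF_MSG = 'Pls go away and stop eating my sheep'
--
-- def warn_the_sheep(queue):
--     length = len(queue)
--     if queue[length - 1] == WOLF:
--         return CLOSEST_WOLF_MSG
--
--     count = 0
--     for ele in queue[::-1]: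
--         if ele == WOLF:
--             break
--         if ele == SHEEP:
--             count += 1
--
--     return NOT_CLOSEST_WOLF_MSG.format(count)
-- ===== SOURCE B (Python) =====
-- SHEEP = 'sheep'
-- WOLF = 'wolf'
-- NOT_CLOSEST_WOLF_MSG = "Oi! Sheep number {}! You are about to be eaten by a wolf!"
-- CLOSEST_WOLF_MSG = 'Pls go away and stop eating my sheep'
--
--
-- def warn_the_sheep(queue):
--     if queue[-1] == WOLF:
--         return CLOSEST_WOLF_MSG
--     count = 0
--     for ele in queue:
--         if ele == WOLF:
--             count = 0
--         elif ele == SHEEP: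
--             count += 1
--     return NOT_CLOSEST_WOLF_MSG.format(count)
-- ===== Notes on version B (the rewrite author's own statement) =====
-- stated objective: alternative
-- what changed: B replaces A's reversed-copy scan with a break and a back-to-front sheep counter by a single forward pass over the original list that resets the counter at each wolf, so no reversed copy and no break are needed.
import Mathlib
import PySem

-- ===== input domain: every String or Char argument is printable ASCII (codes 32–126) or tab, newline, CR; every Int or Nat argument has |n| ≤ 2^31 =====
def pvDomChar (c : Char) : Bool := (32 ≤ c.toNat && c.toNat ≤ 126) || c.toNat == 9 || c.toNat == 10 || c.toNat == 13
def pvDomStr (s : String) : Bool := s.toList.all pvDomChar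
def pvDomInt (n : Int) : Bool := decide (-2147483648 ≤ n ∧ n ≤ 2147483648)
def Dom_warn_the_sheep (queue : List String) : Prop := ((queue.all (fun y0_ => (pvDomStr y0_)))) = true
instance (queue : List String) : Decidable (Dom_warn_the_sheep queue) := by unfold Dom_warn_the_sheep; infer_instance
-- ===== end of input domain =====

-- B replaces A's reversed scan-with-break and back-to-front counter by one forward pass
-- resetting the counter at each wolf (objective: alternative; return values proved equal).

-- ===== PORT A =====
-- A's loop over queue[::-1] with `break`: foldl carrying (count, broken?).
def warn_the_sheep (queue : List String) : String :=
  let length : Int := queue.length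
  if (PySem.List.pyGet? queue (length - 1)).getD "" = "wolf" then
    "Pls go away and stop eating my sheep"
  else
    let st := ((PySem.List.slice? queue none none (-1)).getD []).foldl
      (fun (s : Int × Bool) ele =>
        if s.2 then s
        else if ele = "wolf" then (s.1, true)
        else if ele = "sheep" then (s.1 + 1, false)
        else s) ((0 : Int), false)
    "Oi! Sheep number " ++ PySem.Int.toStr st.1 ++ "! You are about to be eaten by a wolf!"

-- ===== PORT B =====
def warn_the_sheep_alt (queue : List String) : String :=
  if (PySem.List.pyGet? queue (-1)).getD "" = "wolf" then
    "Pls go away and stop eating my sheep"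
  else
    let count := queue.foldl
      (fun (c : Int) ele =>
        if ele = "wolf" then 0
        else if ele = "sheep" then c + 1
        else c) (0 : Int)
    "Oi! Sheep number " ++ PySem.Int.toStr count ++ "! You are about to be eaten by a wolf!"

-- ===== PRECONDITION & SPEC =====
-- Pre_ excludes only the empty queue, on which Python A raises IndexError (queue[length-1]).
def Pre_warn_the_sheep (queue : List String) : Prop := queue ≠ []
instance (queue : List String) : Decidable (Pre_warn_the_sheep queue) := by
  unfold Pre_warn_the_sheep; infer_instance
def pvWitness_warn_the_sheep : List String := ["sheep", "wolf", "sheep"]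
def Spec_warn_the_sheep (queue : List String) (out : String) : Prop := out = warn_the_sheep_alt queue
instance (queue : List String) (out : String) : Decidable (Spec_warn_the_sheep queue out) := by
  unfold Spec_warn_the_sheep; infer_instance

-- ===== CLAIM (what is proved, stated in full; the proofs are below) =====
def Claim_equal_warn_the_sheep : Prop := ∀ (queue : List String), Dom_warn_the_sheep queue → Pre_warn_the_sheep queue → Spec_warn_the_sheep queue (warn_the_sheep queue)

-- ===== LEMMAS AND PROOFS =====

-- sheep count of A's reversed scan: sheep seen in r before its first wolf
def pvCnt : List String → Int
  | [] => 0
  | x :: r => if x = "wolf" then 0 else if x = "sheep" then pvCnt r + 1 else pvCnt r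

-- once broken, A's fold is frozen
theorem pvA_frozen (r : List String) (c : Int) :
    r.foldl (fun (s : Int × Bool) ele =>
        if s.2 then s
        else if ele = "wolf" then (s.1, true)
        else if ele = "sheep" then (s.1 + 1, false)
        else s) (c, true) = (c, true) := by
  induction r with
  | nil => rfl
  | cons x r ih => simpa using ih

-- A's break-fold over r computes c + pvCnt r
theorem pvA_fold (r : List String) (c : Int) :
    (r.foldl (fun (s : Int × Bool) ele =>
        if s.2 then s
        else if ele = "wolf" then (s.1, true)
        else if ele = "sheep" then (s.1 + 1, false)
        else s) (c, false)).1 = c + pvCnt r := by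
  induction r generalizing c with
  | nil => simp [pvCnt]
  | cons x r ih =>
    simp only [List.foldl_cons, pvCnt, Bool.false_eq_true, if_false]
    split_ifs with hw hs
    · rw [pvA_frozen]; ring
    · rw [ih]; ring
    · rw [ih]

-- B's forward reset-fold over r.reverse computes pvCnt r
theorem pvB_fold (r : List String) :
    r.reverse.foldl (fun (c : Int) ele =>
        if ele = "wolf" then 0
        else if ele = "sheep" then c + 1
        else c) 0 = pvCnt r := by
  induction r with
  | nil => rfl
  | cons x r ih =>
    simp only [List.reverse_cons, List.foldl_append, List.foldl_cons, List.foldl_nil, pvCnt]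
    rw [ih]

-- both guards read the last element
theorem pvGuard (queue : List String) :
    PySem.List.pyGet? queue ((queue.length : Int) - 1) = PySem.List.pyGet? queue (-1) := by
  cases queue with
  | nil => rfl
  | cons x xs =>
    have h : ((x :: xs).length : Int) - 1 = ((xs.length : Nat) : Int) := by
      push_cast [List.length_cons]; ring
    rw [h, PySem.List.pyGet?_natCast, PySem.List.pyGet?_neg_one]
    simp [List.getLast?_eq_getElem?]

-- ===== VERDICT (by name: the statement is the Claim_ definition above) =====
theorem warn_the_sheep_spec : Claim_equal_warn_the_sheep := by
  intro queue _ _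
  show warn_the_sheep queue = warn_the_sheep_alt queue
  simp only [warn_the_sheep, warn_the_sheep_alt, pvGuard,
    PySem.List.slice?_none_none_neg_one, Option.getD_some]
  split
  · rfl
  · have hA := pvA_fold queue.reverse 0
    have hB := pvB_fold queue.reverse
    rw [List.reverse_reverse] at hB
    rw [hA, hB, zero_add]
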